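-- pv_equiv track=rewrite | github.com/Ken-Obieze/nth_rarest | nth_rarest.py | nth_most_rate
-- ===== SOURCE A (Python) =====
-- def nth_most_rate(lst, n):
--     """Check for the least occurence from a list."""
--     freq = {}
--     for num in lst:
--         freq[num] = freq.get(num, 0) + 1
--
--     sorted_nums = sorted(freq.keys(), key=lambda x: freq[x])
--
--     if n <= len(sorted_nums):
--         return sorted_nums[n - 1]
--     else:
--         return None
-- ===== SOURCE B (Python) =====
-- def nth_most_rate(lst, n):
--     """Check for the least occurence from a list (bucket/counting sort by frequency instead of a comparison sort)."""
--     freq = {}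
--     order = []
--     for num in lst:
--         if num in freq:
--             freq[num] = freq[num] + 1
--         else:
--             freq[num] = 1
--             order.append(num)
--
--     maxf = max(freq.values(), default=0)
--     buckets = {}
--     for k in order:
--         buckets.setdefault(freq[k], []).append(k)
--
--     ordered = []
--     for c in range(1, maxf + 1):
--         ordered.extend(buckets.get(c, []))
--
--     if n <= len(ordered):
--         return ordered[n - 1]
--     return None
-- ===== Notes on version B (the rewrite author's own statement) =====
-- stated objective: alternative
-- what changed: Replaces the comparison sort of the distinct elements keyed by frequency with a counting/bucket sort: keys are appended to a bucket per frequency in first-appearance order and the buckets are concatenated from frequency 1 up, which reproduces the stable sort order without sorting.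
import Mathlib
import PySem

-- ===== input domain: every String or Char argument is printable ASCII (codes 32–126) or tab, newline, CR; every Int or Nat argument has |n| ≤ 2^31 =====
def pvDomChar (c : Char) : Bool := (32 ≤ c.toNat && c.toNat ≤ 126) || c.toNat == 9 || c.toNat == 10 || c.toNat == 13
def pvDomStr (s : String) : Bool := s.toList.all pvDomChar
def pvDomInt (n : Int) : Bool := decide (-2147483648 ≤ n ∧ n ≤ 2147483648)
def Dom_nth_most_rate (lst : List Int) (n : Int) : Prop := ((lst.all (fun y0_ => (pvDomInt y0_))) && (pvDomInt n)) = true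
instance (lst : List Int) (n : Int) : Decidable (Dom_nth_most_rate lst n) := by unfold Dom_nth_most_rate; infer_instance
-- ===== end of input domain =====

-- B replaces A's comparison sort (stable sort of the distinct elements keyed by frequency) with a
-- counting/bucket sort: keys go into a bucket per frequency in first-appearance order and the
-- buckets are concatenated from frequency 1 upward; the selection of the n-th element is unchanged.


-- ===== PORT A =====
def nth_most_rate (lst : List Int) (n : Int) : Option Int :=
  let freq := lst.foldl (fun d num => d.insert num (d.getD num 0 + 1)) (PySem.Dict.empty : PySem.Dict Int Int)
  let sorted_nums := PySem.List.sorted freq.keys (fun x => freq.getD x 0)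
  if n ≤ (sorted_nums.length : Int) then PySem.List.pyGet? sorted_nums (n - 1) else none

-- ===== PORT B =====
def nth_most_rate_alt (lst : List Int) (n : Int) : Option Int :=
  let st := lst.foldl (fun (p : PySem.Dict Int Int × List Int) num =>
      if p.1.contains num then (p.1.insert num (p.1.getD num 0 + 1), p.2)
      else (p.1.insert num 1, p.2 ++ [num])) (PySem.Dict.empty, [])
  let freq := st.1
  let order := st.2
  let maxf := PySem.List.maxD freq.values (fun v => v) 0
  let buckets := order.foldl (fun d k => d.modify (freq.getD k 0) [] (fun b => b ++ [k])) PySem.Dict.empty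
  let ordered := (PySem.List.pyRange 1 (maxf + 1)).flatMap (fun c => buckets.getD c [])
  if n ≤ (ordered.length : Int) then PySem.List.pyGet? ordered (n - 1) else none

-- ===== PRECONDITION & SPEC =====
-- Pre_ excludes exactly the inputs where Python A raises IndexError: n ≤ the number of distinct
-- elements but n - 1 is below minus that number; A returns normally everywhere else.
def Pre_nth_most_rate (lst : List Int) (n : Int) : Prop :=
  1 - ((PySem.List.dedup lst).length : Int) ≤ n
instance (lst : List Int) (n : Int) : Decidable (Pre_nth_most_rate lst n) := by
  unfold Pre_nth_most_rate; infer_instance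
def pvWitness_nth_most_rate : List Int × Int := ([3, 1, 3, 2, 1, 3], 1)
def Spec_nth_most_rate (lst : List Int) (n : Int) (out : Option Int) : Prop := out = nth_most_rate_alt lst n
instance (lst : List Int) (n : Int) (out : Option Int) : Decidable (Spec_nth_most_rate lst n out) := by unfold Spec_nth_most_rate; infer_instance

-- ===== CLAIM (what is proved, stated in full; the proofs are below) =====
def Claim_equal_nth_most_rate : Prop := ∀ (lst : List Int) (n : Int), Dom_nth_most_rate lst n → Pre_nth_most_rate lst n → Spec_nth_most_rate lst n (nth_most_rate lst n)

-- ===== LEMMAS AND PROOFS =====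

-- the bucket decomposition: one bucket per key value v ∈ vs, in order
def pvBkts (vs : List Int) (key : Int → Int) (l : List Int) : List Int :=
  (vs.map (fun v => l.filter (fun x => key x == v))).flatten

lemma pvInsertBy_all_before (before : Int → Int → Bool) (x : Int) (C : List Int)
    (h : ∀ c ∈ C, before x c = true) :
    PySem.List.insertBy before x C = x :: C := by
  cases C with
  | nil => rfl
  | cons c cs => simp [PySem.List.insertBy, h c (by simp)]

lemma pvInsertBy_append (before : Int → Int → Bool) (x : Int) (A C : List Int)
    (h : ∀ a ∈ A, before x a = false) :
    PySem.List.insertBy before x (A ++ C) = A ++ PySem.List.insertBy before x C := by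
  induction A with
  | nil => rfl
  | cons a as ih =>
    simp [PySem.List.insertBy, h a (by simp)]
    exact ih (fun a ha => h a (by simp [ha]))

lemma pvBkts_step (vs : List Int) (key : Int → Int) (l : List Int) (x : Int)
    (hvs : vs.Pairwise (· < ·)) (hx : key x ∈ vs) :
    PySem.List.insertBy (fun a b => decide (key a < key b)) x (pvBkts vs key l)
      = pvBkts vs key (l ++ [x]) := by
  induction vs with
  | nil => simp at hx
  | cons v vs' ih =>
    have hpw := (List.pairwise_cons.mp hvs).1
    have hvs' := (List.pairwise_cons.mp hvs).2
    by_cases hkv : key x = v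
    · -- x goes at the end of bucket v; every later bucket keeps only elements of l
      have h1 : ∀ a ∈ l.filter (fun y => key y == v), (fun a b => decide (key a < key b)) x a = false := by
        intro a ha
        have := (List.mem_filter.mp ha).2
        simp at this ⊢
        omega
      have h2 : ∀ c ∈ pvBkts vs' key l, (fun a b => decide (key a < key b)) x c = true := by
        intro c hc
        simp only [pvBkts, List.mem_flatten, List.mem_map] at hc
        obtain ⟨b, ⟨w, hw, rfl⟩, hcb⟩ := hc
        have := (List.mem_filter.mp hcb).2
        have := hpw w hw
        simp at *
        omega
      have hb' : (vs'.map (fun v' => (l ++ [x]).filter (fun y => key y == v')))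
          = vs'.map (fun v' => l.filter (fun y => key y == v')) := by
        apply List.map_congr_left
        intro v' hv'
        have := hpw v' hv'
        rw [List.filter_append]
        have : (key x == v') = false := by simp; omega
        simp [this]
      simp only [pvBkts, List.map_cons, List.flatten_cons]
      rw [pvInsertBy_append _ _ _ _ h1, pvInsertBy_all_before _ _ _ h2, hb',
        List.filter_append]
      simp [hkv]
    · -- x belongs to a later bucket
      have hx' : key x ∈ vs' := by
        cases hx with
        | head => exact absurd rfl hkv
        | tail _ h => exact h
      have h1 : ∀ a ∈ l.filter (fun y => key y == v), (fun a b => decide (key a < key b)) x a = false := by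
        intro a ha
        have := (List.mem_filter.mp ha).2
        have := hpw _ hx'
        simp at *
        omega
      have hf : (l ++ [x]).filter (fun y => key y == v) = l.filter (fun y => key y == v) := by
        rw [List.filter_append]; simp [hkv]
      simp only [pvBkts, List.map_cons, List.flatten_cons]
      rw [pvInsertBy_append _ _ _ _ h1, hf]
      simp only [pvBkts] at ih
      rw [ih hvs' hx']

lemma pvSorted_eq_bkts (xs : List Int) (vs : List Int) (key : Int → Int)
    (hvs : vs.Pairwise (· < ·)) (hall : ∀ x ∈ xs, key x ∈ vs) :
    PySem.List.sorted xs key = pvBkts vs key xs := by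
  rw [PySem.List.sorted_eq_foldl_insertBy]
  induction xs using List.reverseRecOn with
  | nil => simp [pvBkts]
  | append_singleton l x ih =>
    rw [List.foldl_append, ih (fun y hy => hall y (by simp [hy]))]
    simp only [List.foldl_cons, List.foldl_nil]
    exact pvBkts_step vs key l x hvs (hall x (by simp))

lemma pvPyRange_pairwise_aux (k : Nat) (a : Int) :
    (PySem.List.pyRange a (a + k)).Pairwise (· < ·) := by
  induction k with
  | zero =>
    have : PySem.List.pyRange a (a + (0 : Nat)) = [] := by simp [PySem.List.pyRange]
    rw [this]; exact List.Pairwise.nil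
  | succ m ih =>
    have h1 : a + ((m + 1 : Nat) : Int) = (a + m) + 1 := by push_cast; ring
    rw [h1, PySem.List.pyRange_one_succ_right (by omega)]
    refine List.pairwise_append.mpr ⟨ih, by simp, ?_⟩
    intro x hx y hy
    have := PySem.List.mem_pyRange_one.mp hx
    simp at hy
    omega

lemma pvPyRange_pairwise (a b : Int) : (PySem.List.pyRange a b).Pairwise (· < ·) := by
  by_cases h : a ≤ b
  · have : b = a + ((b - a).toNat : Int) := by omega
    rw [this]; exact pvPyRange_pairwise_aux _ a
  · have : PySem.List.pyRange a b = [] := by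
      simp [PySem.List.pyRange]; omega
    rw [this]; exact List.Pairwise.nil

-- B's pair fold carries A's dict together with its key list
lemma pvFoldPair (l : List Int) (d : PySem.Dict Int Int) (hnd : d.keys.Nodup) :
    l.foldl (fun (p : PySem.Dict Int Int × List Int) num =>
      if p.1.contains num then (p.1.insert num (p.1.getD num 0 + 1), p.2)
      else (p.1.insert num 1, p.2 ++ [num])) (d, d.keys)
    = (l.foldl (fun d num => d.insert num (d.getD num 0 + 1)) d,
       (l.foldl (fun d num => d.insert num (d.getD num 0 + 1)) d).keys) := by
  induction l generalizing d with
  | nil => rfl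
  | cons x xs ih =>
    simp only [List.foldl_cons]
    by_cases hc : d.contains x = true
    · rw [if_pos hc]
      have hk : (d.insert x (d.getD x 0 + 1)).keys = d.keys :=
        PySem.Dict.keys_insert_of_contains d _ hc
      rw [← hk]
      exact ih _ (hk ▸ hnd)
    · have hcf : d.contains x = false := by simpa using hc
      rw [if_neg hc]
      have h0 : d.getD x 0 = 0 := PySem.Dict.getD_of_not_contains d 0 hcf
      have hk : (d.insert x (d.getD x 0 + 1)).keys = d.keys ++ [x] :=
        PySem.Dict.keys_insert_of_not_contains d _ hcf
      have h1 : d.insert x 1 = d.insert x (d.getD x 0 + 1) := by rw [h0]; norm_num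
      rw [h1, ← hk]
      refine ih _ ?_
      rw [hk]
      have hxk : x ∉ d.keys := fun hm =>
        hc ((PySem.Dict.contains_iff_mem_keys d x).mpr hm)
      simp [List.nodup_append, hnd]
      exact fun a ha heq => hxk (heq ▸ ha)

lemma pvBuckets_getD (order : List Int) (key : Int → Int) (c : Int) :
    (order.foldl (fun d k => d.modify (key k) [] (fun b => b ++ [k])) PySem.Dict.empty).getD c []
      = order.filter (fun k => key k == c) := by
  have h : order.foldl (fun d k => d.modify (key k) [] (fun b => b ++ [k])) PySem.Dict.empty
      = (order.map (fun k => (key k, k))).foldl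
          (fun d p => d.modify p.1 [] (fun b => b ++ [p.2])) PySem.Dict.empty := by
    rw [List.foldl_map]
  rw [h, PySem.Dict.getD_foldl_modify_append]
  simp [List.filter_map, Function.comp_def]

-- the main list identity: A's stable sort of the keys equals B's bucket concatenation
lemma pvLists_eq (lst : List Int) :
    PySem.List.sorted (PySem.Dict.counter lst).keys (fun x => (PySem.Dict.counter lst).getD x 0)
      = (PySem.List.pyRange 1 (PySem.List.maxD (PySem.Dict.counter lst).values (fun v => v) 0 + 1)).flatMap
          (fun c => ((PySem.Dict.counter lst).keys.foldl
            (fun d k => d.modify ((PySem.Dict.counter lst).getD k 0) [] (fun b => b ++ [k]))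
            PySem.Dict.empty).getD c []) := by
  set key : Int → Int := fun x => (PySem.Dict.counter lst).getD x 0 with hkey
  set maxf := PySem.List.maxD (PySem.Dict.counter lst).values (fun v => v) 0 with hmaxf
  have hall : ∀ x ∈ (PySem.Dict.counter lst).keys, key x ∈ PySem.List.pyRange 1 (maxf + 1) := by
    intro x hxk
    have hxl : x ∈ lst := by
      rw [PySem.Dict.keys_counter] at hxk
      exact (PySem.Set.mem_ofList _ _).mp hxk
    have hc1 : (1 : Int) ≤ key x := by
      rw [hkey]; simp only [PySem.Dict.getD_counter]
      exact_mod_cast List.count_pos_iff.mpr hxl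
    have hvmem : key x ∈ (PySem.Dict.counter lst).values := by
      rw [PySem.Dict.values_eq_map_keys _ (PySem.Dict.nodup_keys_counter lst) 0]
      exact List.mem_map.mpr ⟨x, hxk, rfl⟩
    have hle : key x ≤ maxf := by
      cases hm : PySem.List.max? (PySem.Dict.counter lst).values (fun v => v) with
      | none =>
        rw [PySem.List.max?_eq_none_iff] at hm
        rw [hm] at hvmem; simp at hvmem
      | some m =>
        have := PySem.List.max?_isMax hm (key x) hvmem
        have hmd : maxf = m := by rw [hmaxf]; simp [PySem.List.maxD, hm]
        simpa [hmd] using this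
    exact PySem.List.mem_pyRange_one.mpr ⟨hc1, by omega⟩
  rw [List.flatMap_def]
  have hb : ∀ c, (((PySem.Dict.counter lst).keys.foldl
      (fun d k => d.modify (key k) [] (fun b => b ++ [k])) PySem.Dict.empty).getD c [])
      = (PySem.Dict.counter lst).keys.filter (fun k => key k == c) :=
    fun c => pvBuckets_getD _ key c
  calc PySem.List.sorted (PySem.Dict.counter lst).keys key
      = pvBkts (PySem.List.pyRange 1 (maxf + 1)) key (PySem.Dict.counter lst).keys :=
        pvSorted_eq_bkts _ _ key (pvPyRange_pairwise _ _) hall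
    _ = _ := by
        simp only [pvBkts]
        congr 1
        exact List.map_congr_left (fun c _ => (hb c).symm)

-- ===== VERDICT (by name: the statement is the Claim_ definition above) =====
theorem nth_most_rate_spec : Claim_equal_nth_most_rate := by
  intro lst n _ _
  unfold Spec_nth_most_rate nth_most_rate nth_most_rate_alt
  have hfp := pvFoldPair lst PySem.Dict.empty (by simp)
  simp only [show (PySem.Dict.empty : PySem.Dict Int Int).keys = [] from rfl] at hfp
  simp only [hfp]
  have e1 : List.foldl (fun d num => d.insert num (d.getD num 0 + 1)) PySem.Dict.empty lst
      = PySem.Dict.counter lst := rfl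
  simp only [e1]
  rw [pvLists_eq lst]
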